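-- pv_equiv track=rewrite | github.com/tidesglenn/Pipeline- | validators.py | detect_duplicate_destinations
-- ===== SOURCE A (Python) =====
-- from typing import Dict, Iterable, List, Tuple
--
-- def detect_duplicate_destinations(rows: Iterable[Dict[str, str]], key_name: str) -> List[str]:
--     seen = {}
--     duplicates: List[str] = []
--     for row in rows:
--         value = row.get(key_name, "").strip().lower()
--         row_id = row.get("RowID", "")
--         if not value:
--             continue
--         if value in seen:
--             duplicates.append(row_id)
--             duplicates.append(seen[value])
--         else:
--             seen[value] = row_id
--     return sorted(set(duplicates))
-- ===== SOURCE B (Python) =====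
-- def detect_duplicate_destinations(rows, key_name):
--     # Count-then-filter: one pass collecting (value, RowID) pairs and occurrence
--     # counts, then a comprehension keeps the RowIDs of values seen >= 2 times.
--     pairs = []
--     counts = {}
--     for row in rows:
--         value = row.get(key_name, "").strip().lower()
--         if value:
--             pairs.append((value, row.get("RowID", "")))
--             counts[value] = counts.get(value, 0) + 1
--     return sorted({rid for value, rid in pairs if counts[value] >= 2})
-- ===== Notes on version B (the rewrite author's own statement) =====
-- stated objective: simpler
-- what changed: Replaces the first-seen dict with dual appends on collision by a count-then-filter structure: one pass records (value, RowID) pairs and occurrence counts, then a comprehension keeps RowIDs whose value occurs at least twice.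
import Mathlib
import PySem

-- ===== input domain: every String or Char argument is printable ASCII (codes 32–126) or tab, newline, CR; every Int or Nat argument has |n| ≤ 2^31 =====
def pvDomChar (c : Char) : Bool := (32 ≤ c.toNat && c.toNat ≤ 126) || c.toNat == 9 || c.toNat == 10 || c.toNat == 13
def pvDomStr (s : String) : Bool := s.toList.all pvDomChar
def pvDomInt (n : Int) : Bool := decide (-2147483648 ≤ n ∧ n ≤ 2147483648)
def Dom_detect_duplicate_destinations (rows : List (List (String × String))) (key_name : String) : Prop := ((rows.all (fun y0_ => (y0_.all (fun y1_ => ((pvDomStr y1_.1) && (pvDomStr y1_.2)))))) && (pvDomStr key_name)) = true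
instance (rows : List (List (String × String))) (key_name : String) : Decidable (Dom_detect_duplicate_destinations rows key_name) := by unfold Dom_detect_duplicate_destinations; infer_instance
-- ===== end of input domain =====

-- B replaces A's first-seen dict with dual appends on collision by a count-then-filter
-- structure (collect (value, RowID) pairs and counts, then keep RowIDs of values with count >= 2); objective: simpler.

-- shared row accessors: row.get(key, "") .strip() .lower()  and  row.get("RowID", "")
def pvNorm (row : List (String × String)) (k : String) : String :=
  PySem.Str.lower (PySem.Str.strip (PySem.Dict.getD ⟨row⟩ k ""))

def pvRowId (row : List (String × String)) : String :=
  PySem.Dict.getD ⟨row⟩ "RowID" ""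

-- ===== PORT A =====
def pvStepA (k : String) (st : PySem.Dict String String × List String)
    (row : List (String × String)) : PySem.Dict String String × List String :=
  let value := pvNorm row k
  let row_id := pvRowId row
  if value = "" then st
  else if st.1.contains value then
    -- seen[value]: guarded by 'value in seen', so getD is exact here
    (st.1, st.2 ++ [row_id, st.1.getD value ""])
  else (st.1.insert value row_id, st.2)

def detect_duplicate_destinations (rows : List (List (String × String))) (key_name : String) : List String :=
  let st := rows.foldl (pvStepA key_name) (PySem.Dict.empty, [])
  PySem.List.sorted (PySem.Set.ofList st.2) (fun x => x) false

-- ===== PORT B =====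
def pvStepB (k : String) (st : List (String × String) × PySem.Dict String Int)
    (row : List (String × String)) : List (String × String) × PySem.Dict String Int :=
  let value := pvNorm row k
  if value = "" then st
  else (st.1 ++ [(value, pvRowId row)], st.2.insert value (st.2.getD value 0 + 1))

def detect_duplicate_destinations_alt (rows : List (List (String × String))) (key_name : String) : List String :=
  let st := rows.foldl (pvStepB key_name) ([], PySem.Dict.empty)
  -- counts[value]: every value in pairs was counted, so getD is exact here
  PySem.List.sorted
    (PySem.Set.ofList ((st.1.filter (fun p => decide (2 ≤ st.2.getD p.1 0))).map (fun p => p.2)))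
    (fun x => x) false

-- ===== PRECONDITION & SPEC =====
def Spec_detect_duplicate_destinations (rows : List (List (String × String))) (key_name : String) (out : List String) : Prop := out = detect_duplicate_destinations_alt rows key_name
instance (rows : List (List (String × String))) (key_name : String) (out : List String) : Decidable (Spec_detect_duplicate_destinations rows key_name out) := by unfold Spec_detect_duplicate_destinations; infer_instance

-- ===== CLAIM (what is proved, stated in full; the proofs are below) =====
def Claim_equal_detect_duplicate_destinations : Prop := ∀ (rows : List (List (String × String))) (key_name : String), Dom_detect_duplicate_destinations rows key_name → Spec_detect_duplicate_destinations rows key_name (detect_duplicate_destinations rows key_name)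

-- ===== LEMMAS AND PROOFS =====

-- the (normalized value, RowID) pairs of the rows with nonempty normalized value
def pvPairs (k : String) (rows : List (List (String × String))) : List (String × String) :=
  rows.filterMap (fun row =>
    let v := pvNorm row k
    if v = "" then none else some (v, pvRowId row))

-- the RowIDs of the rows whose normalized value is v, in order
def pvIds (k : String) (v : String) (rows : List (List (String × String))) : List String :=
  ((pvPairs k rows).filter (fun p => p.1 == v)).map (fun p => p.2)

-- what A's loop has appended, relative to the 'seen' dict it started from
def pvPhi (k : String) (seen : PySem.Dict String String)
    (rows : List (List (String × String))) (x : String) : Prop :=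
  ∃ v, v ≠ "" ∧
    ((seen.contains v = true ∧ pvIds k v rows ≠ [] ∧
        (x ∈ pvIds k v rows ∨ x = seen.getD v "")) ∨
     (seen.contains v = false ∧ x ∈ pvIds k v rows ∧ 2 ≤ (pvIds k v rows).length))

lemma pvIds_cons_eq (k v : String) (row : List (String × String)) (rows : List (List (String × String)))
    (h : pvNorm row k = v) (hv : v ≠ "") :
    pvIds k v (row :: rows) = pvRowId row :: pvIds k v rows := by
  simp [pvIds, pvPairs, h, hv]

lemma pvIds_cons_ne (k v : String) (row : List (String × String)) (rows : List (List (String × String)))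
    (h : pvNorm row k ≠ v) :
    pvIds k v (row :: rows) = pvIds k v rows := by
  by_cases h0 : pvNorm row k = ""
  · simp [pvIds, pvPairs, h0]
  · simp [pvIds, pvPairs, h0, h]

lemma loopA_mem (k : String) : ∀ (rows : List (List (String × String)))
    (seen : PySem.Dict String String) (dup : List String) (x : String),
    x ∈ (rows.foldl (pvStepA k) (seen, dup)).2 ↔ x ∈ dup ∨ pvPhi k seen rows x := by
  intro rows
  induction rows with
  | nil =>
    intro seen dup x
    simp [pvPhi, pvIds, pvPairs]
  | cons r rest ih =>
    intro seen dup x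
    rw [List.foldl_cons]
    by_cases h0 : pvNorm r k = ""
    · have hstep : pvStepA k (seen, dup) r = (seen, dup) := by simp [pvStepA, h0]
      rw [hstep, ih]
      apply or_congr_right
      unfold pvPhi
      apply exists_congr; intro v
      by_cases hv : v = ""
      · subst hv; simp
      · rw [pvIds_cons_ne k v r rest (by rw [h0]; exact Ne.symm hv)]
    · have hids := pvIds_cons_eq k (pvNorm r k) r rest rfl h0
      by_cases hc : seen.contains (pvNorm r k)
      · have hstep : pvStepA k (seen, dup) r
            = (seen, dup ++ [pvRowId r, seen.getD (pvNorm r k) ""]) := by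
          simp [pvStepA, h0, hc]
        rw [hstep, ih]
        constructor
        · rintro (h | ⟨v, hv, hcase⟩)
          · rw [List.mem_append] at h
            rcases h with h | h
            · exact Or.inl h
            · simp only [List.mem_cons, List.not_mem_nil, or_false] at h
              refine Or.inr ⟨pvNorm r k, h0, Or.inl ⟨hc, by rw [hids]; simp, ?_⟩⟩
              rcases h with h | h
              · exact Or.inl (by rw [hids, h]; exact List.mem_cons_self ..)
              · exact Or.inr h
          · refine Or.inr ⟨v, hv, ?_⟩
            by_cases hvv : v = pvNorm r k
            · subst hvv
              rcases hcase with ⟨hct, hne, hmem⟩ | ⟨hcf, _, _⟩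
              · refine Or.inl ⟨hct, by rw [hids]; simp, ?_⟩
                rcases hmem with hm | hm
                · exact Or.inl (by rw [hids]; exact List.mem_cons_of_mem _ hm)
                · exact Or.inr hm
              · exact absurd hc (by simp [hcf])
            · rw [pvIds_cons_ne k v r rest (Ne.symm hvv)]
              exact hcase
        · rintro (h | ⟨v, hv, hcase⟩)
          · exact Or.inl (List.mem_append_left _ h)
          · by_cases hvv : v = pvNorm r k
            · subst hvv
              rcases hcase with ⟨hct, hne2, hmem⟩ | ⟨hcf, _, _⟩
              · rcases hmem with hm | hm
                · rw [hids] at hm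
                  rcases List.mem_cons.mp hm with he | hm'
                  · exact Or.inl (List.mem_append_right _ (by simp [he]))
                  · exact Or.inr ⟨_, hv, Or.inl ⟨hct, List.ne_nil_of_mem hm', Or.inl hm'⟩⟩
                · exact Or.inl (List.mem_append_right _ (by simp [hm]))
              · exact absurd hc (by simp [hcf])
            · rw [pvIds_cons_ne k v r rest (Ne.symm hvv)] at hcase
              exact Or.inr ⟨v, hv, hcase⟩
      · have hstep : pvStepA k (seen, dup) r
            = (seen.insert (pvNorm r k) (pvRowId r), dup) := by
          simp [pvStepA, h0, hc]
        rw [hstep, ih]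
        apply or_congr_right
        unfold pvPhi
        apply exists_congr; intro v
        apply and_congr_right; intro hv
        by_cases hvv : v = pvNorm r k
        · subst hvv
          rw [hids, PySem.Dict.contains_insert_self, PySem.Dict.getD_insert_self]
          have hc' : seen.contains (pvNorm r k) = false := by simpa using hc
          constructor
          · rintro (⟨_, hne, hmem⟩ | ⟨hff, _, _⟩)
            · refine Or.inr ⟨hc', ?_, ?_⟩
              · rcases hmem with hm | hm
                · exact List.mem_cons_of_mem _ hm
                · rw [hm]; exact List.mem_cons_self ..
              · have := List.length_pos_of_ne_nil hne
                simp only [List.length_cons]; omega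
            · simp at hff
          · rintro (⟨hct, _, _⟩ | ⟨_, hmem, hlen⟩)
            · exact absurd hct (by simp [hc'])
            · refine Or.inl ⟨rfl, ?_, ?_⟩
              · intro hnil
                rw [hnil] at hlen
                simp at hlen
              · rcases List.mem_cons.mp hmem with he | hm
                · exact Or.inr he
                · exact Or.inl hm
        · rw [pvIds_cons_ne k v r rest (Ne.symm hvv)]
          simp [PySem.Dict.contains_insert, PySem.Dict.getD_insert, hvv]

lemma loopB_spec (k : String) : ∀ (rows : List (List (String × String)))
    (st : List (String × String) × PySem.Dict String Int),
    (rows.foldl (pvStepB k) st).1 = st.1 ++ pvPairs k rows ∧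
    ∀ v, (rows.foldl (pvStepB k) st).2.getD v 0 = st.2.getD v 0 + ((pvPairs k rows).map (fun p => p.1)).count v := by
  intro rows
  induction rows with
  | nil => intro st; simp [pvPairs]
  | cons r rest ih =>
    intro st
    rw [List.foldl_cons]
    by_cases h0 : pvNorm r k = ""
    · have hstep : pvStepB k st r = st := by simp [pvStepB, h0]
      rw [hstep]
      have hp : pvPairs k (r :: rest) = pvPairs k rest := by simp [pvPairs, h0]
      rw [hp]
      exact ih st
    · have hstep : pvStepB k st r
          = (st.1 ++ [(pvNorm r k, pvRowId r)],
             st.2.insert (pvNorm r k) (st.2.getD (pvNorm r k) 0 + 1)) := by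
        simp [pvStepB, h0]
      have hp : pvPairs k (r :: rest) = (pvNorm r k, pvRowId r) :: pvPairs k rest := by
        simp [pvPairs, h0]
      rw [hstep, hp]
      obtain ⟨ih1, ih2⟩ := ih (st.1 ++ [(pvNorm r k, pvRowId r)],
             st.2.insert (pvNorm r k) (st.2.getD (pvNorm r k) 0 + 1))
      refine ⟨by rw [ih1]; simp, ?_⟩
      intro v
      rw [ih2 v]
      simp only [PySem.Dict.getD_insert, List.map_cons, List.count_cons]
      by_cases hvv : v = pvNorm r k
      · simp [hvv]; ring
      · simp [hvv, Ne.symm hvv]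

lemma count_firsts_eq_length_ids (k v : String) (rows : List (List (String × String))) :
    ((pvPairs k rows).map (fun p => p.1)).count v = (pvIds k v rows).length := by
  simp only [pvIds, List.count_eq_countP, List.length_map,
    ← List.countP_eq_length_filter, List.countP_map]
  rfl

lemma mem_ids_iff (k v x : String) (rows : List (List (String × String))) :
    x ∈ pvIds k v rows ↔ ∃ p ∈ pvPairs k rows, p.1 = v ∧ p.2 = x := by
  simp [pvIds, List.mem_map, List.mem_filter]

lemma pairs_fst_ne (k : String) (rows : List (List (String × String))) :
    ∀ p ∈ pvPairs k rows, p.1 ≠ "" := by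
  intro p hp
  rw [pvPairs, List.mem_filterMap] at hp
  obtain ⟨row, _, h⟩ := hp
  by_cases h0 : pvNorm row k = "" <;> simp [h0] at h
  rw [← h]
  exact h0

-- membership characterization of both pre-sort lists
lemma memA (k x : String) (rows : List (List (String × String))) :
    x ∈ (rows.foldl (pvStepA k) (PySem.Dict.empty, [])).2 ↔
      ∃ v, v ≠ "" ∧ x ∈ pvIds k v rows ∧ 2 ≤ (pvIds k v rows).length := by
  rw [loopA_mem k rows PySem.Dict.empty [] x]
  simp [pvPhi, PySem.Dict.contains_empty]

lemma memB (k x : String) (rows : List (List (String × String))) :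
    (x ∈ ((rows.foldl (pvStepB k) ([], PySem.Dict.empty)).1.filter
        (fun p => decide (2 ≤ (rows.foldl (pvStepB k) ([], PySem.Dict.empty)).2.getD p.1 0))).map (fun p => p.2)) ↔
      ∃ v, v ≠ "" ∧ x ∈ pvIds k v rows ∧ 2 ≤ (pvIds k v rows).length := by
  obtain ⟨hB1, hB2⟩ := loopB_spec k rows ([], PySem.Dict.empty)
  simp only [hB1, hB2, List.nil_append, PySem.Dict.getD_empty, zero_add]
  constructor
  · intro hmem
    rw [List.mem_map] at hmem
    obtain ⟨p, hp, hx⟩ := hmem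
    rw [List.mem_filter, decide_eq_true_iff] at hp
    obtain ⟨hpin, hcnt⟩ := hp
    refine ⟨p.1, pairs_fst_ne k rows p hpin, ?_, ?_⟩
    · exact (mem_ids_iff k p.1 x rows).mpr ⟨p, hpin, rfl, hx⟩
    · rw [← count_firsts_eq_length_ids]
      exact_mod_cast hcnt
  · rintro ⟨v, hv, hxin, hlen⟩
    obtain ⟨p, hpin, hp1, hp2⟩ := (mem_ids_iff k v x rows).mp hxin
    rw [List.mem_map]
    refine ⟨p, ?_, hp2⟩
    rw [List.mem_filter, decide_eq_true_iff]
    refine ⟨hpin, ?_⟩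
    rw [hp1, count_firsts_eq_length_ids]
    exact_mod_cast hlen

-- ===== VERDICT (by name: the statement is the Claim_ definition above) =====
theorem detect_duplicate_destinations_spec : Claim_equal_detect_duplicate_destinations := by
  intro rows k _
  unfold Spec_detect_duplicate_destinations detect_duplicate_destinations detect_duplicate_destinations_alt
  apply PySem.List.sorted_eq_sorted_of_perm _ _ _ (fun a b h => h)
  rw [List.perm_ext_iff_of_nodup (PySem.Set.nodup_ofList _) (PySem.Set.nodup_ofList _)]
  intro x
  rw [PySem.Set.mem_ofList, PySem.Set.mem_ofList, memA, memB]
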